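-- pv_equiv track=rewrite | github.com/fspv/learning | binarysearch.com/Non-Adjacent-Combination-Sum.py | solve
-- ===== SOURCE A (Python) =====
-- from typing import List
--
-- def solve(nums: List[int], k: int) -> bool:
--     dp = [
--         {0} for _ in range(len(nums) + 2)
--     ]
--
--     for pos in range(len(nums)):
--         for num in dp[pos]:
--             dp[pos + 2].add(num + nums[pos])
--             dp[pos + 1].add(num)
--
--             if k in {num, num + nums[pos]}:
--                 return True
--
--     return False
-- ===== SOURCE B (Python) =====
-- from typing import List
--
-- def solve(nums: List[int], k: int) -> bool:
--     # Top-down memoized branch-and-bound over (index, remaining target):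
--     # at index i either skip nums[i] (go to i+1) or take it (subtract, jump to i+2);
--     # prune when the remaining target is outside the min/max non-adjacent
--     # subset sum still achievable in the suffix nums[i:].
--     if not nums:
--         return False
--     n = len(nums)
--     lo = [0, 0]
--     hi = [0, 0]
--     for x in reversed(nums):
--         lo = [min(lo[0], x + lo[1])] + lo
--         hi = [max(hi[0], x + hi[1])] + hi
--     memo = {}
--
--     def rec(i, rem):
--         if rem == 0:
--             return True
--         if i >= n:
--             return False
--         if rem < lo[i] or rem > hi[i]:
--             return False
--         if (i, rem) not in memo:
--             memo[(i, rem)] = rec(i + 1, rem) or rec(i + 2, rem - nums[i])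
--         return memo[(i, rem)]
--
--     return rec(0, k)
-- ===== Notes on version B (the rewrite author's own statement) =====
-- stated objective: faster
-- what changed: Replaces A's forward table of per-position reachable-sum sets (with an early return inside the inner loop) by a top-down memoized branch-and-bound recursion on (index, remaining target) that branches on skip-vs-take-with-gap decisions and prunes branches whose remaining target lies outside precomputed min/max non-adjacent suffix-sum bounds.
import Mathlib
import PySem

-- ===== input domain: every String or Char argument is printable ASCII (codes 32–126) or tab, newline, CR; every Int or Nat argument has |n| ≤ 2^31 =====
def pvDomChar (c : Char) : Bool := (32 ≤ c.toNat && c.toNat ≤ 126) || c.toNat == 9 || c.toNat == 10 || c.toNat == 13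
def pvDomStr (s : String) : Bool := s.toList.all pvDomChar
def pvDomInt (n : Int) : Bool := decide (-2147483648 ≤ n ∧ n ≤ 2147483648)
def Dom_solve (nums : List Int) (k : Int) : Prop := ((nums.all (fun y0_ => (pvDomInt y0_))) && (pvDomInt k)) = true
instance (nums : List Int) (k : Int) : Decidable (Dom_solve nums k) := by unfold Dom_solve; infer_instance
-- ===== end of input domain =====

-- B replaces A's forward table of per-position sum sets (with early return) by a top-down
-- memoized recursion on (index, remaining target) branching on skip/take decisions, pruned by
-- precomputed min/max suffix bounds (objective: faster; a timing run measured B faster).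

-- ===== PORT A =====
-- inner loop 'for num in dp[pos]: dp[pos+2].add(num+x); dp[pos+1].add(num); if k in {num, num+x}: return True'
-- (elems is the iterated set dp[pos]; result none = 'return True', some = updated (dp[pos+1], dp[pos+2]))
def innerA (k x : Int) : List Int → PySem.Set Int → PySem.Set Int → Option (PySem.Set Int × PySem.Set Int)
  | [], d1, d2 => some (d1, d2)
  | num :: rest, d1, d2 =>
      let d2' := PySem.Set.add d2 (num + x)
      let d1' := PySem.Set.add d1 num
      if (PySem.Set.ofList [num, num + x]).contains k then none
      else innerA k x rest d1' d2'

-- outer loop 'for pos in range(len(nums))'; the dp suffix dp[pos:] is carried (entries before pos are never read again)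
def goA (k : Int) : List Int → List (PySem.Set Int) → Bool
  | [], _ => false
  | x :: rest, d0 :: d1 :: d2 :: dtail =>
      match innerA k x d0 d1 d2 with
      | none => true
      | some (d1', d2') => goA k rest (d1' :: d2' :: dtail)
  | _ :: _, _ => false   -- unreachable: dp always has length (remaining)+2

def solve (nums : List Int) (k : Int) : Bool :=
  goA k nums (List.replicate (nums.length + 2) (PySem.Set.ofList [0]))

-- ===== PORT B =====
-- "for x in reversed(nums): lo = [min(lo[0], x + lo[1])] + lo" — the reversed-iteration
-- prepend loop is the structural recursion over the list (each step prepends one entry)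
def loL : List Int → List Int
  | [] => [0, 0]
  | x :: t => min ((loL t).getD 0 0) (x + (loL t).getD 1 0) :: loL t

def hiL : List Int → List Int
  | [] => [0, 0]
  | x :: t => max ((hiL t).getD 0 0) (x + (hiL t).getD 1 0) :: hiL t

-- 'rec(i, rem)' with the memo dict threaded through; fuel bounds the recursion depth
-- (fuel ≥ n - i always holds at every call, so the fuel-exhausted branch is never taken).
-- 'nums[i]', 'lo[i]', 'hi[i]' are read with getD: the branches guarantee the index is in range.
def recB (nums : List Int) (n : Nat) (lo hi : List Int) (fuel : Nat) (i : Nat) (rem : Int)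
    (memo : PySem.Dict (Nat × Int) Bool) : Bool × PySem.Dict (Nat × Int) Bool :=
  if rem = 0 then (true, memo)
  else if n ≤ i then (false, memo)
  else if rem < lo.getD i 0 ∨ hi.getD i 0 < rem then (false, memo)
  else
    match fuel with
    | 0 => (false, memo)   -- fuel guard only (unreachable)
    | fuel' + 1 =>
      match memo.get? (i, rem) with
      | some b => (b, memo)
      | none =>
        -- memo[(i, rem)] = rec(i+1, rem) or rec(i+2, rem - nums[i])   (short-circuit 'or')
        let r1 := recB nums n lo hi fuel' (i + 1) rem memo
        if r1.1 then (true, r1.2.insert (i, rem) true)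
        else
          let r2 := recB nums n lo hi fuel' (i + 2) (rem - nums.getD i 0) r1.2
          (r2.1, r2.2.insert (i, rem) r2.1)

def solve_alt (nums : List Int) (k : Int) : Bool :=
  if nums.isEmpty then false
  else (recB nums nums.length (loL nums) (hiL nums) nums.length 0 k PySem.Dict.empty).1

-- ===== PRECONDITION & SPEC =====
def Spec_solve (nums : List Int) (k : Int) (out : Bool) : Prop := out = solve_alt nums k
instance (nums : List Int) (k : Int) (out : Bool) : Decidable (Spec_solve nums k out) := by unfold Spec_solve; infer_instance

-- ===== CLAIM (what is proved, stated in full; the proofs are below) =====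
def Claim_equal_solve : Prop := ∀ (nums : List Int) (k : Int), Dom_solve nums k → Spec_solve nums k (solve nums k)

-- ===== LEMMAS AND PROOFS =====

-- v is a sum of a non-adjacent subset of l
def AllNA : List Int → Int → Prop
  | [], v => v = 0
  | [x], v => v = 0 ∨ v = x
  | x :: y :: t, v => AllNA (y :: t) v ∨ ∃ w, AllNA t w ∧ v = w + x

-- v is a sum of a non-adjacent subset of l that uses the LAST element of l
def EndS (l : List Int) (v : Int) : Prop :=
  ∃ y w, l.getLast? = some y ∧ AllNA l.dropLast.dropLast w ∧ v = w + y

-- the disjunction of A's per-iteration trigger conditions ('return True' at some position)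
def CheckP : List Int → List Int → Int → Prop
  | _, [], _ => False
  | pref, x :: r, k =>
      (AllNA pref.dropLast k ∨ ∃ w, AllNA pref.dropLast w ∧ k = w + x) ∨ CheckP (pref ++ [x]) r k

theorem AllNA_zero : ∀ (l : List Int), AllNA l 0 := by
  intro l
  match l with
  | [] => simp [AllNA]
  | [x] => simp [AllNA]
  | x :: y :: t => exact Or.inl (AllNA_zero (y :: t))

theorem AllNA_cons (a : Int) (m : List Int) (v : Int) :
    AllNA (a :: m) v ↔ AllNA m v ∨ ∃ w, AllNA m.tail w ∧ v = w + a := by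
  match m with
  | [] => simp [AllNA]
  | y :: t => simp [AllNA]

theorem tail_dropLast_cons (b : Int) (t : List Int) :
    (List.dropLast (b :: t)).tail = List.dropLast t := by
  cases t <;> simp

theorem AllNA_snoc : ∀ (l : List Int) (x v : Int),
    AllNA (l ++ [x]) v ↔ AllNA l v ∨ ∃ w, AllNA l.dropLast w ∧ v = w + x
  | [], x, v => by simp [AllNA]
  | [a], x, v => by simp [AllNA]; tauto
  | a :: b :: t, x, v => by
    rw [show (a :: b :: t) ++ [x] = a :: ((b :: t) ++ [x]) from rfl,
        AllNA_cons a ((b :: t) ++ [x]) v,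
        show ((b :: t) ++ [x]).tail = t ++ [x] from rfl]
    simp only [AllNA_snoc (b :: t) x, AllNA_snoc t x]
    rw [AllNA_cons a (b :: t) v, show (b :: t).tail = t from rfl,
        show (a :: b :: t).dropLast = a :: (b :: t).dropLast from rfl]
    simp only [AllNA_cons a ((b :: t).dropLast), tail_dropLast_cons b t]
    constructor
    · rintro ((h | ⟨u, hu, rfl⟩) | ⟨w, (hw | ⟨u, hu, rfl⟩), rfl⟩)
      · exact Or.inl (Or.inl h)
      · exact Or.inr ⟨u, Or.inl hu, rfl⟩
      · exact Or.inl (Or.inr ⟨w, hw, rfl⟩)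
      · exact Or.inr ⟨u + a, Or.inr ⟨u, hu, rfl⟩, by ring⟩
    · rintro ((h | ⟨w, hw, rfl⟩) | ⟨w, (hw | ⟨u, hu, rfl⟩), rfl⟩)
      · exact Or.inl (Or.inl h)
      · exact Or.inr ⟨w, Or.inl hw, rfl⟩
      · exact Or.inl (Or.inr ⟨w, hw, rfl⟩)
      · exact Or.inr ⟨u + x, Or.inr ⟨u, hu, rfl⟩, by ring⟩

theorem AllNA_append_left (l m : List Int) (v : Int) (h : AllNA l v) : AllNA (l ++ m) v := by
  induction m using List.reverseRecOn with
  | nil => simpa using h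
  | append_singleton m' x ih =>
      rw [show l ++ (m' ++ [x]) = (l ++ m') ++ [x] by simp, AllNA_snoc]
      exact Or.inl ih

theorem EndS_snoc (l : List Int) (x v : Int) :
    EndS (l ++ [x]) v ↔ ∃ w, AllNA l.dropLast w ∧ v = w + x := by
  unfold EndS
  simp

theorem AllNA_split (l : List Int) (v : Int) :
    AllNA l v ↔ v = 0 ∨ EndS l v ∨ AllNA l.dropLast v := by
  rcases List.eq_nil_or_concat l with rfl | ⟨q, y, rfl⟩
  · simp [AllNA, EndS]
  · rw [List.concat_eq_append, AllNA_snoc, EndS_snoc]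
    simp only [List.dropLast_concat]
    constructor
    · rintro (h | h)
      · exact Or.inr (Or.inr h)
      · exact Or.inr (Or.inl h)
    · rintro (rfl | h | h)
      · exact Or.inl (AllNA_zero q)
      · exact Or.inr h
      · exact Or.inl h

theorem trigger_iff (k x num : Int) :
    (PySem.Set.ofList [num, num + x]).contains k = true ↔ (k = num ∨ k = num + x) := by
  rw [PySem.Set.contains_iff, PySem.Set.mem_ofList]
  simp

theorem innerA_none_iff (k x : Int) : ∀ (elems : List Int) (d1 d2 : PySem.Set Int),
    innerA k x elems d1 d2 = none ↔ ∃ num ∈ elems, k = num ∨ k = num + x := by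
  intro elems
  induction elems with
  | nil => intro d1 d2; simp [innerA]
  | cons num rest ih =>
      intro d1 d2
      rw [innerA]
      by_cases h : (PySem.Set.ofList [num, num + x]).contains k = true
      · rw [if_pos h]
        rw [trigger_iff] at h
        exact ⟨fun _ => ⟨num, List.mem_cons_self, h⟩, fun _ => rfl⟩
      · rw [if_neg h, ih]
        rw [trigger_iff] at h
        constructor
        · rintro ⟨n, hn, hk⟩; exact ⟨n, List.mem_cons_of_mem _ hn, hk⟩
        · rintro ⟨n, hn, hk⟩
          rcases List.mem_cons.mp hn with rfl | hn'
          · exact absurd hk h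
          · exact ⟨n, hn', hk⟩

theorem innerA_some_mem (k x : Int) : ∀ (elems : List Int) (d1 d2 d1' d2' : PySem.Set Int),
    innerA k x elems d1 d2 = some (d1', d2') →
    ∀ v : Int, (v ∈ d1' ↔ v ∈ d1 ∨ v ∈ elems) ∧ (v ∈ d2' ↔ v ∈ d2 ∨ ∃ num ∈ elems, v = num + x) := by
  intro elems
  induction elems with
  | nil =>
      intro d1 d2 d1' d2' h v
      rw [innerA] at h
      injection h with h
      injection h with h1 h2
      subst h1; subst h2
      simp
  | cons num rest ih =>
      intro d1 d2 d1' d2' h v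
      rw [innerA] at h
      by_cases hc : (PySem.Set.ofList [num, num + x]).contains k = true
      · rw [if_pos hc] at h; exact absurd h (by simp)
      · rw [if_neg hc] at h
        rcases ih _ _ _ _ h v with ⟨h1, h2⟩
        constructor
        · rw [h1, PySem.Set.mem_add]
          simp only [List.mem_cons]
          tauto
        · rw [h2, PySem.Set.mem_add]
          simp only [List.mem_cons]
          constructor
          · rintro ((hv | rfl) | ⟨n, hn, rfl⟩)
            · exact Or.inl hv
            · exact Or.inr ⟨num, Or.inl rfl, rfl⟩
            · exact Or.inr ⟨n, Or.inr hn, rfl⟩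
          · rintro (hv | ⟨n, (rfl | hn), rfl⟩)
            · exact Or.inl (Or.inl hv)
            · exact Or.inl (Or.inr rfl)
            · exact Or.inr ⟨n, hn, rfl⟩

theorem goA_char (k : Int) : ∀ (r pref : List Int) (d0 d1 : PySem.Set Int) (dtail : List (PySem.Set Int)),
    dtail.length = r.length →
    (∀ s ∈ dtail, ∀ v : Int, v ∈ s ↔ v = 0) →
    (∀ v : Int, v ∈ d0 ↔ AllNA pref.dropLast v) →
    (∀ v : Int, v ∈ d1 ↔ (v = 0 ∨ EndS pref v)) →
    (goA k r (d0 :: d1 :: dtail) = true ↔ CheckP pref r k) := by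
  intro r
  induction r with
  | nil => intro pref d0 d1 dtail _ _ _ _; simp [goA, CheckP]
  | cons x rest ih =>
      intro pref d0 d1 dtail hlen hdt hd0 hd1
      cases dtail with
      | nil => simp at hlen
      | cons d2 dtail' =>
          rw [goA, CheckP]
          have hd2 : ∀ v : Int, v ∈ d2 ↔ v = 0 := hdt d2 List.mem_cons_self
          have htrig : (innerA k x d0 d1 d2 = none) ↔
              (AllNA pref.dropLast k ∨ ∃ w, AllNA pref.dropLast w ∧ k = w + x) := by
            rw [innerA_none_iff]
            constructor
            · rintro ⟨num, hnum, hk⟩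
              rcases hk with hk | hk
              · exact Or.inl (hk ▸ (hd0 num).mp hnum)
              · exact Or.inr ⟨num, (hd0 num).mp hnum, hk⟩
            · rintro (h | ⟨w, hw, rfl⟩)
              · exact ⟨k, (hd0 k).mpr h, Or.inl rfl⟩
              · exact ⟨w, (hd0 w).mpr hw, Or.inr rfl⟩
          rcases hA : innerA k x d0 d1 d2 with _ | ⟨d1', d2'⟩
          · simp only [true_iff]
            exact Or.inl (htrig.mp hA)
          · have hmem := innerA_some_mem k x d0 d1 d2 d1' d2' hA
            have hnotrig : ¬(AllNA pref.dropLast k ∨ ∃ w, AllNA pref.dropLast w ∧ k = w + x) := by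
              rw [← htrig, hA]; simp
            have hd0' : ∀ v : Int, v ∈ d1' ↔ AllNA (pref ++ [x]).dropLast v := by
              intro v
              rw [show (pref ++ [x]).dropLast = pref by simp]
              rw [(hmem v).1, hd1 v, hd0 v, AllNA_split pref v]
              tauto
            have hd1' : ∀ v : Int, v ∈ d2' ↔ (v = 0 ∨ EndS (pref ++ [x]) v) := by
              intro v
              rw [(hmem v).2, hd2 v, EndS_snoc]
              constructor
              · rintro (rfl | ⟨n, hn, rfl⟩)
                · exact Or.inl rfl
                · exact Or.inr ⟨n, (hd0 n).mp hn, rfl⟩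
              · rintro (rfl | ⟨w, hw, rfl⟩)
                · exact Or.inl rfl
                · exact Or.inr ⟨w, (hd0 w).mpr hw, rfl⟩
            rw [ih (pref ++ [x]) d1' d2' dtail' (by simpa using hlen)
                  (fun s hs => hdt s (List.mem_cons_of_mem _ hs)) hd0' hd1']
            exact (or_iff_right hnotrig).symm

theorem CheckP_char : ∀ (r pref : List Int) (k : Int), r ≠ [] →
    ((CheckP pref r k ∨ EndS pref k) ↔ AllNA (pref ++ r) k) := by
  intro r
  induction r with
  | nil => intro pref k h; exact absurd rfl h
  | cons x r' ih =>
      intro pref k _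
      rw [CheckP]
      cases r' with
      | nil =>
          rw [CheckP]
          have h1 : AllNA (pref ++ [x]) k ↔ k = 0 ∨ EndS (pref ++ [x]) k ∨ AllNA pref k :=
            by rw [AllNA_split]; simp
          have h2 : AllNA pref k ↔ k = 0 ∨ EndS pref k ∨ AllNA pref.dropLast k := AllNA_split pref k
          have h3 : EndS (pref ++ [x]) k ↔ ∃ w, AllNA pref.dropLast w ∧ k = w + x := EndS_snoc pref x k
          have h0 : k = 0 → AllNA pref.dropLast k := fun h => h ▸ AllNA_zero _
          rw [h1, h2, h3]
          constructor
          · rintro (((h | h) | hF) | h)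
            · exact Or.inr (Or.inr (Or.inr (Or.inr h)))
            · exact Or.inr (Or.inl h)
            · exact hF.elim
            · exact Or.inr (Or.inr (Or.inr (Or.inl h)))
          · rintro (rfl | h | rfl | h | h)
            · exact Or.inl (Or.inl (Or.inl (h0 rfl)))
            · exact Or.inl (Or.inl (Or.inr h))
            · exact Or.inl (Or.inl (Or.inl (h0 rfl)))
            · exact Or.inr h
            · exact Or.inl (Or.inl (Or.inl h))
      | cons y r'' =>
          have hih := ih (pref ++ [x]) k (by simp)
          rw [show pref ++ [x] ++ (y :: r'') = pref ++ (x :: y :: r'') by simp] at hih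
          have hEx : (∃ w, AllNA pref.dropLast w ∧ k = w + x) ↔ EndS (pref ++ [x]) k :=
            (EndS_snoc pref x k).symm
          have hmono1 : AllNA pref.dropLast k → AllNA (pref ++ (x :: y :: r'')) k := by
            intro h
            exact AllNA_append_left _ _ _ ((AllNA_split pref k).mpr (Or.inr (Or.inr h)))
          have hmono2 : EndS pref k → AllNA (pref ++ (x :: y :: r'')) k := by
            intro h
            exact AllNA_append_left _ _ _ ((AllNA_split pref k).mpr (Or.inr (Or.inl h)))
          rw [hEx]
          constructor
          · rintro (((h | h) | h) | h)
            · exact hmono1 h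
            · exact hih.mp (Or.inr h)
            · exact hih.mp (Or.inl h)
            · exact hmono2 h
          · intro h
            rcases hih.mpr h with hc | he
            · exact Or.inl (Or.inr hc)
            · exact Or.inl (Or.inl (Or.inr he))

theorem EndS_nil (k : Int) : ¬ EndS [] k := by
  simp [EndS]

theorem solve_char (nums : List Int) (k : Int) :
    solve nums k = true ↔ (nums ≠ [] ∧ AllNA nums k) := by
  cases nums with
  | nil => simp [solve, goA]
  | cons x rest =>
      unfold solve
      rw [show (x :: rest).length + 2 = (rest.length + 1) + 1 + 1 from rfl,
          List.replicate_succ, List.replicate_succ]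
      rw [goA_char k (x :: rest) [] (PySem.Set.ofList [0]) (PySem.Set.ofList [0])
            (List.replicate (rest.length + 1) (PySem.Set.ofList [0]))
            (by simp)
            (fun s hs v => by rw [List.eq_of_mem_replicate hs]; simp [PySem.Set.mem_ofList])
            (fun v => by simp [PySem.Set.mem_ofList, AllNA])
            (fun v => by simp [PySem.Set.mem_ofList, EndS])]
      have hchar := CheckP_char (x :: rest) [] k (by simp)
      rw [List.nil_append] at hchar
      constructor
      · intro h
        exact ⟨by simp, hchar.mp (Or.inl h)⟩
      · rintro ⟨-, h⟩
        rcases hchar.mpr h with hc | he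
        · exact hc
        · exact absurd he (EndS_nil k)

-- ---- B-side: suffix bounds, the memo-free value of rec(i, rem), then the memoized recursion ----

-- lo/hi bound every non-adjacent subset sum of the suffix nums.drop i
theorem loL_hiL_bound (nums : List Int) : ∀ (i : Nat) (v : Int),
    AllNA (nums.drop i) v → (loL nums).getD i 0 ≤ v ∧ v ≤ (hiL nums).getD i 0 := by
  induction nums with
  | nil =>
      intro i v h
      rw [List.drop_nil] at h
      have hv : v = 0 := h
      subst hv
      constructor <;> rcases i with _ | _ | i <;> simp [loL, hiL]
  | cons x t ih =>
      intro i v h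
      rcases i with _ | i
      · rw [List.drop_zero] at h
        rw [AllNA_cons] at h
        rcases h with h | ⟨w, hw, rfl⟩
        · have hb := ih 0 v (by simpa using h)
          refine ⟨?_, ?_⟩
          · calc (loL (x :: t)).getD 0 0 = min ((loL t).getD 0 0) (x + (loL t).getD 1 0) := by
                  rw [loL]; simp
              _ ≤ (loL t).getD 0 0 := min_le_left _ _
              _ ≤ v := hb.1
          · calc v ≤ (hiL t).getD 0 0 := hb.2
              _ ≤ max ((hiL t).getD 0 0) (x + (hiL t).getD 1 0) := le_max_left _ _
              _ = (hiL (x :: t)).getD 0 0 := by rw [hiL]; simp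
        · have hb := ih 1 w (by simpa [List.drop_one] using hw)
          refine ⟨?_, ?_⟩
          · calc (loL (x :: t)).getD 0 0 = min ((loL t).getD 0 0) (x + (loL t).getD 1 0) := by
                  rw [loL]; simp
              _ ≤ x + (loL t).getD 1 0 := min_le_right _ _
              _ ≤ x + w := by have := hb.1; omega
              _ = w + x := by ring
          · calc w + x = x + w := by ring
              _ ≤ x + (hiL t).getD 1 0 := by have := hb.2; omega
              _ ≤ max ((hiL t).getD 0 0) (x + (hiL t).getD 1 0) := le_max_right _ _
              _ = (hiL (x :: t)).getD 0 0 := by rw [hiL]; simp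
      · have h' : AllNA (t.drop i) v := by simpa using h
        have hb := ih i v h'
        refine ⟨?_, ?_⟩
        · calc (loL (x :: t)).getD (i + 1) 0 = (loL t).getD i 0 := by rw [loL]; simp
            _ ≤ v := hb.1
        · calc v ≤ (hiL t).getD i 0 := hb.2
            _ = (hiL (x :: t)).getD (i + 1) 0 := by rw [hiL]; simp

-- the pure value rec(i, rem) computes (same tests in the same order, no memo)
def gB (nums : List Int) (n : Nat) (fuel : Nat) (i : Nat) (rem : Int) : Bool :=
  if rem = 0 then true
  else if n ≤ i then false
  else if rem < (loL nums).getD i 0 ∨ (hiL nums).getD i 0 < rem then false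
  else match fuel with
    | 0 => false
    | fuel' + 1 => gB nums n fuel' (i + 1) rem || gB nums n fuel' (i + 2) (rem - nums.getD i 0)

theorem gB_zero (nums : List Int) (n fuel i : Nat) {rem : Int} (hz : rem = 0) :
    gB nums n fuel i rem = true := by
  cases fuel <;> rw [gB] <;> simp [hz]

theorem gB_stop (nums : List Int) (n fuel i : Nat) {rem : Int} (hz : ¬ rem = 0) (hni : n ≤ i) :
    gB nums n fuel i rem = false := by
  cases fuel <;> rw [gB] <;> simp [hz, hni]

theorem gB_prune (nums : List Int) (n fuel i : Nat) {rem : Int} (hz : ¬ rem = 0) (hni : ¬ n ≤ i)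
    (hpr : rem < (loL nums).getD i 0 ∨ (hiL nums).getD i 0 < rem) :
    gB nums n fuel i rem = false := by
  cases fuel <;> rw [gB, if_neg hz, if_neg hni, if_pos hpr]

theorem gB_fuel (nums : List Int) (n : Nat) : ∀ (f1 f2 i : Nat) (rem : Int),
    n - i ≤ f1 → n - i ≤ f2 → gB nums n f1 i rem = gB nums n f2 i rem := by
  intro f1
  induction f1 with
  | zero =>
      intro f2 i rem h1 _
      by_cases hz : rem = 0
      · rw [gB_zero nums n 0 i hz, gB_zero nums n f2 i hz]
      · have hni : n ≤ i := by omega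
        rw [gB_stop nums n 0 i hz hni, gB_stop nums n f2 i hz hni]
  | succ f1' ih =>
      intro f2 i rem h1 h2
      by_cases hz : rem = 0
      · rw [gB_zero nums n (f1' + 1) i hz, gB_zero nums n f2 i hz]
      · by_cases hni : n ≤ i
        · rw [gB_stop nums n (f1' + 1) i hz hni, gB_stop nums n f2 i hz hni]
        · by_cases hpr : rem < (loL nums).getD i 0 ∨ (hiL nums).getD i 0 < rem
          · rw [gB_prune nums n (f1' + 1) i hz hni hpr, gB_prune nums n f2 i hz hni hpr]
          · rcases f2 with _ | f2'
            · omega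
            · rw [gB, gB]
              simp only [if_neg hz, if_neg hni, if_neg hpr]
              rw [ih f2' (i + 1) rem (by omega) (by omega),
                  ih f2' (i + 2) (rem - nums.getD i 0) (by omega) (by omega)]

theorem gB_spec (nums : List Int) : ∀ (fuel i : Nat) (rem : Int),
    nums.length - i ≤ fuel →
    (gB nums nums.length fuel i rem = true ↔ AllNA (nums.drop i) rem) := by
  intro fuel
  induction fuel with
  | zero =>
      intro i rem h
      by_cases hz : rem = 0
      · rw [gB_zero nums nums.length 0 i hz]
        simp [hz, AllNA_zero]
      · have hni : nums.length ≤ i := by omega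
        rw [gB_stop nums nums.length 0 i hz hni, List.drop_eq_nil_of_le hni]
        simp [hz, AllNA]
  | succ fuel' ih =>
      intro i rem h
      by_cases hz : rem = 0
      · rw [gB_zero nums nums.length (fuel' + 1) i hz]
        simp [hz, AllNA_zero]
      · by_cases hni : nums.length ≤ i
        · rw [gB_stop nums nums.length (fuel' + 1) i hz hni, List.drop_eq_nil_of_le hni]
          simp [hz, AllNA]
        · by_cases hpr : rem < (loL nums).getD i 0 ∨ (hiL nums).getD i 0 < rem
          · rw [gB_prune nums nums.length (fuel' + 1) i hz hni hpr]
            simp only [Bool.false_eq_true, false_iff]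
            intro hA
            have hb := loL_hiL_bound nums i rem hA
            omega
          · have hlt : i < nums.length := by omega
            have hdrop : nums.drop i = nums[i] :: nums.drop (i + 1) :=
              List.drop_eq_getElem_cons hlt
            have hget : nums.getD i 0 = nums[i] := List.getD_eq_getElem nums 0 hlt
            rw [gB]
            simp only [if_neg hz, if_neg hni, if_neg hpr, Bool.or_eq_true]
            rw [ih (i + 1) rem (by omega),
                ih (i + 2) (rem - nums.getD i 0) (by omega),
                hdrop, AllNA_cons, List.tail_drop]
            have htl : (i + 1) + 1 = i + 2 := rfl
            rw [htl, hget]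
            constructor
            · rintro (hA | hB)
              · exact Or.inl hA
              · exact Or.inr ⟨rem - nums[i], hB, by ring⟩
            · rintro (hA | ⟨w, hw, rfl⟩)
              · exact Or.inl hA
              · exact Or.inr (by simpa using hw)

-- memoized recB computes gB and preserves the memo invariant
theorem recB_spec (nums : List Int) (n : Nat) : ∀ (fuel i : Nat) (rem : Int)
    (memo : PySem.Dict (Nat × Int) Bool), n - i ≤ fuel →
    (∀ p b, memo.get? p = some b → b = gB nums n (n - p.1) p.1 p.2) →
    (recB nums n (loL nums) (hiL nums) fuel i rem memo).1 = gB nums n (n - i) i rem ∧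
    (∀ p b, (recB nums n (loL nums) (hiL nums) fuel i rem memo).2.get? p = some b →
      b = gB nums n (n - p.1) p.1 p.2) := by
  intro fuel
  induction fuel with
  | zero =>
      intro i rem memo h hinv
      rw [recB]
      by_cases hz : rem = 0
      · rw [if_pos hz]
        exact ⟨(gB_zero nums n (n - i) i hz).symm, hinv⟩
      · have hni : n ≤ i := by omega
        rw [if_neg hz, if_pos hni]
        exact ⟨(gB_stop nums n (n - i) i hz hni).symm, hinv⟩
  | succ fuel' ih =>
      intro i rem memo h hinv
      rw [recB]
      by_cases hz : rem = 0
      · rw [if_pos hz]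
        exact ⟨(gB_zero nums n (n - i) i hz).symm, hinv⟩
      · rw [if_neg hz]
        by_cases hni : n ≤ i
        · rw [if_pos hni]
          exact ⟨(gB_stop nums n (n - i) i hz hni).symm, hinv⟩
        · rw [if_neg hni]
          by_cases hpr : rem < (loL nums).getD i 0 ∨ (hiL nums).getD i 0 < rem
          · rw [if_pos hpr]
            exact ⟨(gB_prune nums n (n - i) i hz hni hpr).symm, hinv⟩
          · rw [if_neg hpr]
            have hgstep : gB nums n (n - i) i rem =
                (gB nums n (n - (i + 1)) (i + 1) rem ||
                 gB nums n (n - (i + 2)) (i + 2) (rem - nums.getD i 0)) := by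
              have hndec : n - i = (n - i - 1) + 1 := by omega
              rw [hndec, gB]
              simp only [if_neg hz, if_neg hni, if_neg hpr]
              rw [gB_fuel nums n (n - i - 1) (n - (i + 1)) (i + 1) rem (by omega) (by omega),
                  gB_fuel nums n (n - i - 1) (n - (i + 2)) (i + 2) (rem - nums.getD i 0) (by omega) (by omega)]
            rcases hm : memo.get? (i, rem) with _ | b
            · -- memo miss
              obtain ⟨h1v, h1inv⟩ := ih (i + 1) rem memo (by omega) hinv
              by_cases hb1 : (recB nums n (loL nums) (hiL nums) fuel' (i + 1) rem memo).1 = true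
              · rw [if_pos hb1]
                have hgtrue : gB nums n (n - i) i rem = true := by
                  rw [hgstep, ← h1v, hb1]
                  simp
                refine ⟨by rw [hgtrue], ?_⟩
                intro p b' hp
                rw [PySem.Dict.get?_insert] at hp
                by_cases hpe : p = (i, rem)
                · rw [if_pos hpe] at hp
                  injection hp with hp
                  subst hpe
                  rw [← hp]
                  exact hgtrue.symm
                · rw [if_neg hpe] at hp
                  exact h1inv p b' hp
              · rw [if_neg hb1]
                obtain ⟨h2v, h2inv⟩ := ih (i + 2) (rem - nums.getD i 0)
                  (recB nums n (loL nums) (hiL nums) fuel' (i + 1) rem memo).2 (by omega) h1inv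
                have hb1f : gB nums n (n - (i + 1)) (i + 1) rem = false := by
                  rw [← h1v]
                  exact Bool.eq_false_iff.mpr hb1
                have hval : (recB nums n (loL nums) (hiL nums) fuel' (i + 2) (rem - nums.getD i 0)
                    (recB nums n (loL nums) (hiL nums) fuel' (i + 1) rem memo).2).1 =
                    gB nums n (n - i) i rem := by
                  rw [hgstep, hb1f, Bool.false_or, h2v]
                refine ⟨hval, ?_⟩
                intro p b' hp
                rw [PySem.Dict.get?_insert] at hp
                by_cases hpe : p = (i, rem)
                · rw [if_pos hpe] at hp
                  injection hp with hp
                  subst hpe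
                  rw [← hp]
                  exact hval
                · rw [if_neg hpe] at hp
                  exact h2inv p b' hp
            · -- memo hit
              refine ⟨?_, hinv⟩
              simpa using (hinv (i, rem) b hm).symm.symm

theorem solve_alt_char (nums : List Int) (k : Int) :
    solve_alt nums k = true ↔ (nums ≠ [] ∧ AllNA nums k) := by
  unfold solve_alt
  by_cases hnil : nums.isEmpty
  · simp [List.isEmpty_iff.mp hnil]
  · have hne : nums ≠ [] := by simpa [List.isEmpty_iff] using hnil
    rw [if_neg hnil]
    have hinv : ∀ (p : Nat × Int) (b : Bool),
        (PySem.Dict.empty : PySem.Dict (Nat × Int) Bool).get? p = some b →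
        b = gB nums nums.length (nums.length - p.1) p.1 p.2 := by
      intro p b hp
      rw [PySem.Dict.get?_empty] at hp
      exact absurd hp (by simp)
    have := recB_spec nums nums.length nums.length 0 k PySem.Dict.empty (by omega) hinv
    rw [this.1, Nat.sub_zero]
    rw [gB_spec nums nums.length 0 k (by omega), List.drop_zero]
    exact ⟨fun h => ⟨hne, h⟩, fun h => h.2⟩

-- ===== VERDICT (by name: the statement is the Claim_ definition above) =====
theorem solve_spec : Claim_equal_solve := by
  intro nums k _
  unfold Spec_solve
  rw [Bool.eq_iff_iff, solve_char, solve_alt_char]
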